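-- pv_equiv track=rewrite | github.com/Sabacc-Organization/Sabacc-Org | server/traditional/alderaanHelpers.py | calcBestVal
-- ===== SOURCE A (Python) =====
-- def calcBestVal(handVals):
--
--     # Iterate through hand values looking for best value
--     bestVal = 0
--     for val in handVals:
--             # Idiot's Array, unbeatable
--             if val == 230:
--                 bestVal = val
--                 break
--
--             # Current val is better than stored val
--             elif abs(val) > abs(bestVal):
--                 bestVal = val
--
--             # Current val abs is equal to stored val abs
--             elif abs(val) == abs(bestVal):
--                 if val < bestVal: # aka if this new val is negative and the old one is positive
--                     bestVal = val # Negative beats positive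
--
--     # Everyone bombed out
--     if bestVal == 0:
--         return None
--
--     return bestVal
-- ===== SOURCE B (Python) =====
-- def _better(x, y):
--     # total-order selection: 230 (Idiot's Array) is the top element; otherwise
--     # larger absolute value wins and, on an abs tie, the more negative value wins.
--     if x == 230 or y == 230:
--         return 230
--     if abs(y) > abs(x) or (abs(y) == abs(x) and y < x):
--         return y
--     return x
--
-- def _tournament(vals):
--     # divide-and-conquer: best of each half, then one comparison.
--     if len(vals) == 1:
--         return vals[0]
--     mid = len(vals) // 2
--     return _better(_tournament(vals[:mid]), _tournament(vals[mid:]))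
--
-- def calcBestVal(handVals):
--     if not handVals:
--         return None
--     b = _tournament(handVals)
--     return b if b != 0 else None
-- ===== Notes on version B (the rewrite author's own statement) =====
-- stated objective: alternative
-- what changed: Replaced the linear accumulate-with-break loop by a divide-and-conquer tournament: an associative 'better' comparator (230 is the top element, then larger abs, negative wins ties) is applied over a recursive halving of the list, and the zero sentinel becomes an explicit emptiness/zero check.
import Mathlib
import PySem

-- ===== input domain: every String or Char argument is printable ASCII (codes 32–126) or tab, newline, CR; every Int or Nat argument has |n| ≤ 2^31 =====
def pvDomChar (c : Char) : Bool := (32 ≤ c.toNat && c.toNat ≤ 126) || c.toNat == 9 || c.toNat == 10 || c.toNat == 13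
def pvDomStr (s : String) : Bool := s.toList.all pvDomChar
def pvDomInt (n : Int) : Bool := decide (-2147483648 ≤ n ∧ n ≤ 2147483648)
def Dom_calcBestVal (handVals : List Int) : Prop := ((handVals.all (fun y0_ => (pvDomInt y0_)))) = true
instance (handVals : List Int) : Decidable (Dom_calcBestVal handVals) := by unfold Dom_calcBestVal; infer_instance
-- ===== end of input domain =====

-- B replaces A's linear accumulate-with-break loop by a divide-and-conquer tournament
-- over an associative comparator (alternative decomposition, same return values).

-- ===== PORT A =====
-- A's loop with its early break on 230, as structural recursion over (list, accumulator).
def calcBestValLoop : List Int → Int → Int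
  | [], bestVal => bestVal
  | val :: rest, bestVal =>
    if val = 230 then 230
    else if |val| > |bestVal| then calcBestValLoop rest val
    else if |val| = |bestVal| then
      (if val < bestVal then calcBestValLoop rest val else calcBestValLoop rest bestVal)
    else calcBestValLoop rest bestVal

def calcBestVal (handVals : List Int) : Option Int :=
  let bestVal := calcBestValLoop handVals 0
  if bestVal = 0 then none else some bestVal

-- ===== PORT B =====
-- Source B's _better: total-order selection, 230 on top, then larger abs, negative wins ties.
def pvBetter (x y : Int) : Int :=
  if x = 230 ∨ y = 230 then 230
  else if |y| > |x| ∨ (|y| = |x| ∧ y < x) then y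
  else x

-- Source B's _tournament: best of each half, then one comparison.
-- Structural recursion on a fuel = initial length (a totality guard only: the fuel
-- never runs out on the calls Source B makes, and Source B is never called on []).
def pvTournamentF : Nat → List Int → Int
  | _, [] => 0
  | _, [x] => x
  | 0, _ => 0
  | fuel + 1, x :: y :: rest =>
    let xs := x :: y :: rest
    let mid := xs.length / 2
    pvBetter (pvTournamentF fuel (xs.take mid)) (pvTournamentF fuel (xs.drop mid))

def pvTournament (xs : List Int) : Int := pvTournamentF xs.length xs

def calcBestVal_alt (handVals : List Int) : Option Int :=
  if handVals = [] then none
  else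
    let b := pvTournament handVals
    if b ≠ 0 then some b else none

-- ===== PRECONDITION & SPEC =====
def Spec_calcBestVal (handVals : List Int) (out : Option Int) : Prop := out = calcBestVal_alt handVals
instance (handVals : List Int) (out : Option Int) : Decidable (Spec_calcBestVal handVals out) := by unfold Spec_calcBestVal; infer_instance

-- ===== CLAIM =====
def Claim_equal_calcBestVal : Prop := ∀ (handVals : List Int), Dom_calcBestVal handVals → Spec_calcBestVal handVals (calcBestVal handVals)

-- ===== LEMMAS AND PROOFS =====

theorem pvBetter_zero_left (y : Int) : pvBetter 0 y = y := by
  unfold pvBetter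
  split_ifs with h1 h2
  · omega
  · rfl
  · simp only [Int.abs_eq_natAbs] at h2; omega

theorem pvBetter_zero_right (x : Int) : pvBetter x 0 = x := by
  unfold pvBetter
  split_ifs with h1 h2
  · omega
  · simp only [Int.abs_eq_natAbs] at h2; omega
  · rfl

theorem pvBetter_assoc (a b c : Int) :
    pvBetter (pvBetter a b) c = pvBetter a (pvBetter b c) := by
  unfold pvBetter
  simp only [Int.abs_eq_natAbs]
  split_ifs <;> omega

-- folding from any seed = one comparison with the zero-seeded fold
theorem foldl_pvBetter_seed (r : List Int) (a : Int) :
    r.foldl pvBetter a = pvBetter a (r.foldl pvBetter 0) := by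
  induction r generalizing a with
  | nil => simp [List.foldl_nil, pvBetter_zero_right]
  | cons v r' ih =>
    simp only [List.foldl_cons, pvBetter_zero_left]
    rw [ih (pvBetter a v), ih v, pvBetter_assoc]

-- with enough fuel the tournament computes the zero-seeded fold of pvBetter
theorem pvTournamentF_eq_foldl (fuel : Nat) (xs : List Int) (h : xs.length <= fuel) :
    pvTournamentF fuel xs = xs.foldl pvBetter 0 := by
  induction fuel generalizing xs with
  | zero =>
    match xs with
    | [] => rfl
    | [x] => simp at h
  | succ fuel ih =>
    match xs with
    | [] => rfl
    | [x] => simp [pvTournamentF, pvBetter_zero_left]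
    | x :: y :: rest =>
      rw [pvTournamentF]
      set l := x :: y :: rest with hl
      have hlen : 2 <= l.length := by simp [hl]
      have htake : (l.take (l.length / 2)).length <= fuel := by
        simp only [List.length_take]
        simp only [hl, List.length_cons] at h ⊢
        omega
      have hdrop : (l.drop (l.length / 2)).length <= fuel := by
        simp only [List.length_drop]
        simp only [hl, List.length_cons] at h ⊢
        omega
      rw [ih _ htake, ih _ hdrop]
      conv_rhs => rw [← List.take_append_drop (l.length / 2) l, List.foldl_append,
        foldl_pvBetter_seed]

theorem pvTournament_eq_foldl (xs : List Int) :
    pvTournament xs = xs.foldl pvBetter 0 :=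
  pvTournamentF_eq_foldl xs.length xs (le_refl _)

-- A's loop from accumulator 230 (and generally: once 230 is in the list the fold is 230)
theorem foldl_pvBetter_230 (xs : List Int) : xs.foldl pvBetter 230 = 230 := by
  induction xs with
  | nil => rfl
  | cons v r ih =>
    have : pvBetter 230 v = 230 := by unfold pvBetter; simp
    simp [List.foldl_cons, this, ih]

theorem loop_of_mem_230 (hv : List Int) (b : Int) (h : (230 : Int) ∈ hv) :
    calcBestValLoop hv b = 230 := by
  induction hv generalizing b with
  | nil => cases h
  | cons v rest ih =>
    by_cases hv230 : v = 230
    · simp [calcBestValLoop, hv230]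
    · have hmem : (230 : Int) ∈ rest := by
        rcases List.mem_cons.mp h with h' | h'
        · exact absurd h'.symm hv230
        · exact h'
      simp only [calcBestValLoop, if_neg hv230]
      split_ifs <;> exact ih _ hmem

theorem foldl_of_mem_230 (hv : List Int) (b : Int) (h : (230 : Int) ∈ hv) :
    hv.foldl pvBetter b = 230 := by
  induction hv generalizing b with
  | nil => cases h
  | cons v rest ih =>
    by_cases hv230 : v = 230
    · subst hv230
      have : pvBetter b 230 = 230 := by unfold pvBetter; simp
      simp [List.foldl_cons, this, foldl_pvBetter_230]
    · have hmem : (230 : Int) ∈ rest := by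
        rcases List.mem_cons.mp h with h' | h'
        · exact absurd h'.symm hv230
        · exact h'
      simp only [List.foldl_cons]
      exact ih _ hmem

-- without a 230 in the list, A's loop IS the pvBetter fold
theorem loop_eq_foldl (hv : List Int) (b : Int) (h : (230 : Int) ∉ hv) (hb : b ≠ 230) :
    calcBestValLoop hv b = hv.foldl pvBetter b := by
  induction hv generalizing b with
  | nil => rfl
  | cons v rest ih =>
    have hv230 : v ≠ 230 := fun he => h (he ▸ List.mem_cons_self ..)
    have hrest : (230 : Int) ∉ rest := fun hm => h (List.mem_cons_of_mem _ hm)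
    simp only [calcBestValLoop, if_neg hv230, List.foldl_cons]
    have hbv : pvBetter b v = if |v| > |b| ∨ (|v| = |b| ∧ v < b) then v else b := by
      unfold pvBetter
      rw [if_neg (by tauto)]
    by_cases h1 : |v| > |b|
    · rw [if_pos h1, hbv, if_pos (Or.inl h1)]
      exact ih _ hrest hv230
    · rw [if_neg h1]
      by_cases h2 : |v| = |b|
      · rw [if_pos h2]
        by_cases h3 : v < b
        · rw [if_pos h3, hbv, if_pos (Or.inr ⟨h2, h3⟩)]
          exact ih _ hrest hv230
        · rw [if_neg h3, hbv, if_neg (by tauto)]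
          exact ih _ hrest hb
      · rw [if_neg h2, hbv, if_neg (by tauto)]
        exact ih _ hrest hb

-- ===== VERDICT =====
theorem calcBestVal_spec : Claim_equal_calcBestVal := by
  intro hv _
  unfold Spec_calcBestVal calcBestVal calcBestVal_alt
  by_cases hemp : hv = []
  · subst hemp; rfl
  · rw [if_neg hemp, pvTournament_eq_foldl]
    by_cases h230 : (230 : Int) ∈ hv
    · rw [loop_of_mem_230 hv 0 h230, foldl_of_mem_230 hv 0 h230]
      norm_num
    · rw [loop_eq_foldl hv 0 h230 (by norm_num)]
      by_cases hz : hv.foldl pvBetter 0 = 0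
      · simp [hz]
      · simp [hz]
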